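-- pv_equiv track=rewrite | github.com/Jiang0307/IMS-Quantifier | Code/utils.py | extract_all_kmers
-- ===== SOURCE A (Python) =====
-- from collections import defaultdict, Counter
--
-- def extract_all_kmers(transcripts, reads, k):
--     kmer_counter = Counter()
--     for seq in transcripts + reads:
--         for i in range(len(seq) - k + 1):
--             kmer = seq[i:i+k]
--             if set(kmer).issubset({'A', 'C', 'G', 'T'}):
--                 kmer_counter[kmer] += 1
--     return sorted(kmer_counter.keys())
-- ===== SOURCE B (Python) =====
-- VALID = {'A', 'C', 'G', 'T'}
--
-- def extract_all_kmers(transcripts, reads, k):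
--     if k <= 0:
--         return []
--     kmers = set()
--     for seq in transcripts + reads:
--         run = 0  # length of the current streak of valid characters
--         for i, c in enumerate(seq):
--             run = run + 1 if c in VALID else 0
--             if run >= k:
--                 kmers.add(seq[i - k + 1:i + 1])
--     return sorted(kmers)
-- ===== Notes on version B (the rewrite author's own statement) =====
-- stated objective: alternative
-- what changed: Instead of validating every length-k window with a per-window set check, B makes a single pass per sequence maintaining the length of the current run of valid ACGT characters and emits the window ending at each position where the run reaches k, collecting distinct k-mers directly in a set.
-- intended difference: For k <= 0 with a nonempty sequence list, A's negative/zero-length slices accidentally produce the empty string (and, for k < 0, arbitrary wrapped-around substrings) as 'k-mers', so A returns a nonempty list always containing ''; B returns [], the intended answer since there are no k-mers of non-positive length. — e.g. on extract_all_kmers(["A"], [], 0): A returns [""], B returns []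
import Mathlib
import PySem

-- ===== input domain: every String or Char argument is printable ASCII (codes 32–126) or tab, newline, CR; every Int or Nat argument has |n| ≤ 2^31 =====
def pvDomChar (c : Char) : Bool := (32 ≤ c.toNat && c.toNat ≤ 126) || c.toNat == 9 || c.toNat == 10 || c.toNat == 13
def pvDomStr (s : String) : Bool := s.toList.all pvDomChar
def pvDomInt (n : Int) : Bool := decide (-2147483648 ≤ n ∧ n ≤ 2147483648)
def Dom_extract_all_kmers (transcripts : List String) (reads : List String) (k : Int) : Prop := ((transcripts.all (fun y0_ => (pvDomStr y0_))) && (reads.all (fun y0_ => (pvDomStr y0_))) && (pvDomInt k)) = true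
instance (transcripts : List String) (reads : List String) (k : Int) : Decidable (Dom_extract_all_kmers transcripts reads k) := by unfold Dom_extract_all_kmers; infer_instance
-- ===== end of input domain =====

-- B replaces A's per-window set-validation of every k-window by a single pass per sequence that
-- tracks the length of the current run of ACGT characters (objective: alternative algorithm).

-- the valid nucleotide alphabet {'A','C','G','T'} (a Python set literal; a PySem.Set is a duplicate-free list)
def pvValidSet : PySem.Set Char := ['A', 'C', 'G', 'T']

-- ===== PORT A =====
def extract_all_kmers (transcripts : List String) (reads : List String) (k : Int) : List String :=
  let counter := (transcripts ++ reads).foldl (fun d seq =>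
    (PySem.List.pyRange 0 (PySem.Str.len seq - k + 1) 1).foldl (fun d i =>
      let kmer := String.ofList (PySem.List.slice seq.toList (some i) (some (i + k)))
      if PySem.Set.issubset (PySem.Set.ofList kmer.toList) pvValidSet then
        d.modify kmer 0 (· + 1)
      else d) d) (PySem.Dict.empty : PySem.Dict String Int)
  PySem.List.sorted counter.keys (fun x => x) false

-- ===== PORT B =====
-- one enumerate step of B's scan: update the run length, emit the window ending here if run ≥ k
def pvStepB (full : List Char) (k : Int) (st : Int × PySem.Set String) (p : Int × Char) :
    Int × PySem.Set String :=
  let run := if p.2 ∈ pvValidSet then st.1 + 1 else 0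
  let s := if k ≤ run then
      PySem.Set.add st.2 (String.ofList (PySem.List.slice full (some (p.1 - k + 1)) (some (p.1 + 1))))
    else st.2
  (run, s)

def extract_all_kmers_alt (transcripts : List String) (reads : List String) (k : Int) : List String :=
  if k ≤ 0 then []
  else
    let kmers := (transcripts ++ reads).foldl (fun acc seq =>
      ((PySem.List.enumerate seq.toList 0).foldl (pvStepB seq.toList k) (0, acc)).2)
      (PySem.Set.empty : PySem.Set String)
    PySem.List.sorted kmers (fun x => x) false

-- ===== PRECONDITION & SPEC =====
-- For k ≤ 0 with a nonempty sequence list, A's zero/negative-length slices accidentally produce ''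
-- (and, for k < 0, wrapped-around substrings) as "k-mers", so A returns a nonempty list always
-- containing ''; B returns [], the intended answer: there are no k-mers of non-positive length.
def D_extract_all_kmers (transcripts : List String) (reads : List String) (k : Int) : Prop :=
  k ≤ 0 ∧ transcripts ++ reads ≠ []
instance (transcripts : List String) (reads : List String) (k : Int) : Decidable (D_extract_all_kmers transcripts reads k) := by unfold D_extract_all_kmers; infer_instance

def Spec_extract_all_kmers (transcripts : List String) (reads : List String) (k : Int) (out : List String) : Prop := ¬ D_extract_all_kmers transcripts reads k → out = extract_all_kmers_alt transcripts reads k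
instance (transcripts : List String) (reads : List String) (k : Int) (out : List String) : Decidable (Spec_extract_all_kmers transcripts reads k out) := by unfold Spec_extract_all_kmers; infer_instance

def pvDiffWitness_extract_all_kmers : List String × List String × Int := (["A"], [], 0)
def pvDiffWitnessOut_extract_all_kmers : (List String) × (List String) := ([""], [])

-- ===== CLAIM (what is proved, stated in full; the proofs are below) =====
def Claim_unchanged_extract_all_kmers : Prop := ∀ (transcripts : List String) (reads : List String) (k : Int), Dom_extract_all_kmers transcripts reads k → Spec_extract_all_kmers transcripts reads k (extract_all_kmers transcripts reads k)
def Claim_changed_extract_all_kmers : Prop := Dom_extract_all_kmers (pvDiffWitness_extract_all_kmers.1) (pvDiffWitness_extract_all_kmers.2.1) (pvDiffWitness_extract_all_kmers.2.2) ∧ D_extract_all_kmers (pvDiffWitness_extract_all_kmers.1) (pvDiffWitness_extract_all_kmers.2.1) (pvDiffWitness_extract_all_kmers.2.2) ∧ extract_all_kmers (pvDiffWitness_extract_all_kmers.1) (pvDiffWitness_extract_all_kmers.2.1) (pvDiffWitness_extract_all_kmers.2.2) = pvDiffWitnessOut_extract_all_kmers.1 ∧ extract_all_kmers_alt (pvDiffWitness_extract_all_kmers.1)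 (pvDiffWitness_extract_all_kmers.2.1) (pvDiffWitness_extract_all_kmers.2.2) = pvDiffWitnessOut_extract_all_kmers.2 ∧ pvDiffWitnessOut_extract_all_kmers.1 ≠ pvDiffWitnessOut_extract_all_kmers.2
def Claim_exact_extract_all_kmers : Prop := ∀ (transcripts : List String) (reads : List String) (k : Int), Dom_extract_all_kmers transcripts reads k → D_extract_all_kmers transcripts reads k → extract_all_kmers transcripts reads k ≠ extract_all_kmers_alt transcripts reads k

-- ===== LEMMAS AND PROOFS =====

-- a character is a valid nucleotide (Bool form used by the invariants)
def pvIsValid (c : Char) : Bool := decide (c ∈ pvValidSet)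

-- length of the maximal all-valid suffix, computed on the reversed list
def pvRevRun : List Char → Nat
  | [] => 0
  | c :: t => if pvIsValid c then pvRevRun t + 1 else 0

def pvRun (cs : List Char) : Nat := pvRevRun cs.reverse

-- the canonical description of a collected k-mer: the valid window of length k' starting at j
def pvWin (cs : List Char) (k' j : Nat) : List Char := (cs.drop j).take k'

def pvKmerOf (seqs : List String) (k' : Nat) (x : String) : Prop :=
  ∃ seq ∈ seqs, ∃ j : Nat, j + k' ≤ seq.toList.length ∧
    (pvWin seq.toList k' j).all pvIsValid ∧ x = String.ofList (pvWin seq.toList k' j)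

lemma pvRevRun_ge_iff (l : List Char) (m : Nat) :
    m ≤ pvRevRun l ↔ m ≤ l.length ∧ (l.take m).all pvIsValid := by
  induction l generalizing m with
  | nil => cases m <;> simp [pvRevRun]
  | cons c t ih =>
    cases m with
    | zero => simp
    | succ m =>
      simp only [pvRevRun, List.take_succ_cons, List.all_cons, List.length_cons]
      by_cases hc : pvIsValid c
      · simp [hc, ih m]
      · simp [hc]

lemma pvRun_ge_iff (cs : List Char) (k' : Nat) :
    k' ≤ pvRun cs ↔ k' ≤ cs.length ∧ ((cs.drop (cs.length - k')).all pvIsValid) := by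
  rw [pvRun, pvRevRun_ge_iff, List.take_reverse, List.all_reverse, List.length_reverse]

lemma pvRun_append_singleton (cs : List Char) (c : Char) :
    pvRun (cs ++ [c]) = if pvIsValid c then pvRun cs + 1 else 0 := by
  simp [pvRun, pvRevRun]

lemma pvRun_le_length (cs : List Char) : pvRun cs ≤ cs.length := by
  have h : ∀ l : List Char, pvRevRun l ≤ l.length := by
    intro l; induction l with
    | nil => simp [pvRevRun]
    | cons c t ih =>
      simp only [pvRevRun, List.length_cons]
      split
      · omega
      · omega
  simpa [pvRun] using h cs.reverse

lemma pvB_inner (full : List Char) (k : Int) (hk : 1 ≤ k) (s0 : PySem.Set String)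
    (hnd : s0.Nodup) (n : Nat) (hn : n ≤ full.length) :
    ((PySem.List.enumerate (full.take n) 0).foldl (pvStepB full k) (0, s0)).1
        = (pvRun (full.take n) : Int) ∧
    ((PySem.List.enumerate (full.take n) 0).foldl (pvStepB full k) (0, s0)).2.Nodup ∧
    (∀ x, x ∈ ((PySem.List.enumerate (full.take n) 0).foldl (pvStepB full k) (0, s0)).2 ↔
      x ∈ s0 ∨ ∃ j : Nat, j + k.toNat ≤ n ∧ (pvWin full k.toNat j).all pvIsValid ∧
        x = String.ofList (pvWin full k.toNat j)) := by
  induction n with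
  | zero =>
    refine ⟨by simp [pvRun, pvRevRun],
            by simpa [PySem.List.enumerate] using hnd, ?_⟩
    intro x
    simp only [List.take_zero, PySem.List.enumerate, List.foldl_nil]
    constructor
    · exact Or.inl
    · rintro (h | ⟨j, hj, -, -⟩)
      · exact h
      · omega
  | succ n ih =>
    have hn' : n ≤ full.length := by omega
    have hlt : n < full.length := by omega
    obtain ⟨ih1, ih2, ih3⟩ := ih hn'
    have htake : full.take (n+1) = full.take n ++ [full[n]] := by
      rw [List.take_add_one, List.getElem?_eq_getElem hlt]; rfl
    have hlen : (full.take n).length = n := List.length_take_of_le hn'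
    have hlen1 : (full.take (n+1)).length = n + 1 := List.length_take_of_le hn
    have henum : PySem.List.enumerate (full.take (n+1)) 0
        = PySem.List.enumerate (full.take n) 0 ++ [((n : Int), full[n])] := by
      rw [htake, PySem.List.enumerate_append, hlen]
      simp [PySem.List.enumerate]
    rw [henum, List.foldl_append]
    set st := (PySem.List.enumerate (full.take n) 0).foldl (pvStepB full k) (0, s0) with hst
    simp only [List.foldl_cons, List.foldl_nil]
    have hrun' : pvRun (full.take (n+1)) = if pvIsValid full[n] then pvRun (full.take n) + 1 else 0 := by
      rw [htake, pvRun_append_singleton]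
    have hrunI : (if full[n] ∈ pvValidSet then st.1 + 1 else 0)
        = (pvRun (full.take (n+1)) : Int) := by
      rw [hrun', ih1]
      by_cases h : full[n] ∈ pvValidSet <;> simp [h, pvIsValid]
    have hstep1 : (pvStepB full k st ((n : Int), full[n])).1 = (pvRun (full.take (n+1)) : Int) := by
      simp only [pvStepB, hrunI]
    have hstep2 : (pvStepB full k st ((n : Int), full[n])).2
        = if k ≤ (pvRun (full.take (n+1)) : Int) then
            PySem.Set.add st.2 (String.ofList
              (PySem.List.slice full (some ((n : Int) - k + 1)) (some ((n : Int) + 1))))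
          else st.2 := by
      simp only [pvStepB, hrunI]
    refine ⟨hstep1, ?_, ?_⟩
    · rw [hstep2]
      split
      · exact PySem.Set.nodup_add _ _ ih2
      · exact ih2
    · intro x
      rw [hstep2]
      by_cases hcond : k ≤ (pvRun (full.take (n+1)) : Int)
      · -- the window ending at n is emitted
        have hk'pos : 0 < k.toNat := by omega
        have hkle : k.toNat ≤ n + 1 := by
          have := pvRun_le_length (full.take (n+1)); rw [hlen1] at this; omega
        have hslice : PySem.List.slice full (some ((n : Int) - k + 1)) (some ((n : Int) + 1))
            = pvWin full k.toNat (n + 1 - k.toNat) := by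
          rw [PySem.List.slice_toNat full (by omega) (by omega)]
          have h1 : ((n : Int) - k + 1).toNat = n + 1 - k.toNat := by omega
          have h2 : ((n : Int) + 1).toNat = n + 1 := by omega
          rw [h1, h2, pvWin]
          congr 1
          omega
        have hge : k.toNat ≤ pvRun (full.take (n+1)) := by omega
        have hall := ((pvRun_ge_iff (full.take (n+1)) k.toNat).mp hge).2
        rw [hlen1, List.drop_take] at hall
        have hsub : n + 1 - (n + 1 - k.toNat) = k.toNat := by omega
        rw [hsub] at hall
        have hvalid : (pvWin full k.toNat (n + 1 - k.toNat)).all pvIsValid := hall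
        rw [if_pos hcond, hslice]
        rw [PySem.Set.mem_add, ih3]
        constructor
        · rintro ((h | ⟨j, hj, hv, hx⟩) | hx)
          · exact Or.inl h
          · exact Or.inr ⟨j, by omega, hv, hx⟩
          · exact Or.inr ⟨n + 1 - k.toNat, by omega, hvalid, hx⟩
        · rintro (h | ⟨j, hj, hv, hx⟩)
          · exact Or.inl (Or.inl h)
          · by_cases hjn : j + k.toNat ≤ n
            · exact Or.inl (Or.inr ⟨j, hjn, hv, hx⟩)
            · have : j = n + 1 - k.toNat := by omega
              subst this
              exact Or.inr hx
      · -- no window is emitted; the window ending at n would be invalid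
        rw [if_neg hcond, ih3]
        constructor
        · rintro (h | ⟨j, hj, hv, hx⟩)
          · exact Or.inl h
          · exact Or.inr ⟨j, by omega, hv, hx⟩
        · rintro (h | ⟨j, hj, hv, hx⟩)
          · exact Or.inl h
          · by_cases hjn : j + k.toNat ≤ n
            · exact Or.inr ⟨j, hjn, hv, hx⟩
            · exfalso
              have hj' : j = n + 1 - k.toNat := by omega
              have hkle : k.toNat ≤ n + 1 := by omega
              have hall' : ((full.take (n+1)).drop ((full.take (n+1)).length - k.toNat)).all pvIsValid := by
                rw [hlen1, List.drop_take]
                have hsub : n + 1 - (n + 1 - k.toNat) = k.toNat := by omega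
                rw [hsub]
                rw [hj'] at hv
                exact hv
              have := (pvRun_ge_iff (full.take (n+1)) k.toNat).mpr ⟨by rw [hlen1]; omega, hall'⟩
              omega

lemma pvB_outer (seqs : List String) (k : Int) (hk : 1 ≤ k) (s0 : PySem.Set String)
    (hnd : s0.Nodup) :
    (seqs.foldl (fun acc seq =>
        ((PySem.List.enumerate seq.toList 0).foldl (pvStepB seq.toList k) (0, acc)).2) s0).Nodup ∧
    (∀ x, x ∈ seqs.foldl (fun acc seq =>
        ((PySem.List.enumerate seq.toList 0).foldl (pvStepB seq.toList k) (0, acc)).2) s0 ↔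
      x ∈ s0 ∨ pvKmerOf seqs k.toNat x) := by
  induction seqs generalizing s0 with
  | nil => exact ⟨hnd, fun x => by simp [pvKmerOf]⟩
  | cons seq rest ih =>
    have h1 := pvB_inner seq.toList k hk s0 hnd seq.toList.length (le_refl _)
    rw [List.take_length] at h1
    obtain ⟨-, hnd1, hmem1⟩ := h1
    obtain ⟨hnd2, hmem2⟩ := ih _ hnd1
    refine ⟨hnd2, fun x => ?_⟩
    simp only [List.foldl_cons]
    rw [hmem2 x]
    rw [hmem1 x]
    simp only [pvKmerOf, List.mem_cons]
    constructor
    · rintro ((h | ⟨j, hj, hv, hx⟩) | ⟨s, hs, j, hj, hv, hx⟩)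
      · exact Or.inl h
      · exact Or.inr ⟨seq, Or.inl rfl, j, hj, hv, hx⟩
      · exact Or.inr ⟨s, Or.inr hs, j, hj, hv, hx⟩
    · rintro (h | ⟨s, (rfl | hs), j, hj, hv, hx⟩)
      · exact Or.inl (Or.inl h)
      · exact Or.inl (Or.inr ⟨j, hj, hv, hx⟩)
      · exact Or.inr ⟨s, hs, j, hj, hv, hx⟩

-- A's inner loop over one sequence, via filtering the index range

lemma pvA_inner (seq : String) (k : Int) (d : PySem.Dict String Int) :
    ((PySem.List.pyRange 0 (PySem.Str.len seq - k + 1) 1).foldl (fun d i =>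
        let kmer := String.ofList (PySem.List.slice seq.toList (some i) (some (i + k)))
        if PySem.Set.issubset (PySem.Set.ofList kmer.toList) pvValidSet then
          d.modify kmer 0 (· + 1)
        else d) d).keys
      = PySem.Set.update d.keys
          (((PySem.List.pyRange 0 (PySem.Str.len seq - k + 1) 1).filter (fun i =>
              PySem.Set.issubset (PySem.Set.ofList
                (String.ofList (PySem.List.slice seq.toList (some i) (some (i + k)))).toList)
                pvValidSet)).map (fun i =>
              String.ofList (PySem.List.slice seq.toList (some i) (some (i + k))))) := by
  rw [← List.foldl_filter]
  exact PySem.Dict.keys_foldl_modify_key _ _ 0 (fun _ _ => (· + 1)) d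

lemma pvA_keys (seqs : List String) (k : Int) (d : PySem.Dict String Int)
    (hnd : d.keys.Nodup) :
    (seqs.foldl (fun d seq =>
      (PySem.List.pyRange 0 (PySem.Str.len seq - k + 1) 1).foldl (fun d i =>
        let kmer := String.ofList (PySem.List.slice seq.toList (some i) (some (i + k)))
        if PySem.Set.issubset (PySem.Set.ofList kmer.toList) pvValidSet then
          d.modify kmer 0 (· + 1)
        else d) d) d).keys.Nodup ∧
    (∀ x, x ∈ (seqs.foldl (fun d seq =>
      (PySem.List.pyRange 0 (PySem.Str.len seq - k + 1) 1).foldl (fun d i =>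
        let kmer := String.ofList (PySem.List.slice seq.toList (some i) (some (i + k)))
        if PySem.Set.issubset (PySem.Set.ofList kmer.toList) pvValidSet then
          d.modify kmer 0 (· + 1)
        else d) d) d).keys ↔
      x ∈ d.keys ∨ ∃ seq ∈ seqs, ∃ i ∈ PySem.List.pyRange 0 (PySem.Str.len seq - k + 1) 1,
        (PySem.Set.issubset (PySem.Set.ofList
            (String.ofList (PySem.List.slice seq.toList (some i) (some (i + k)))).toList) pvValidSet)
          ∧ x = String.ofList (PySem.List.slice seq.toList (some i) (some (i + k)))) := by
  induction seqs generalizing d with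
  | nil => exact ⟨hnd, fun x => by simp⟩
  | cons seq rest ih =>
    have hnd1 : ((PySem.List.pyRange 0 (PySem.Str.len seq - k + 1) 1).foldl (fun d i =>
        let kmer := String.ofList (PySem.List.slice seq.toList (some i) (some (i + k)))
        if PySem.Set.issubset (PySem.Set.ofList kmer.toList) pvValidSet then
          d.modify kmer 0 (· + 1)
        else d) d).keys.Nodup := by
      rw [pvA_inner seq k d]
      exact PySem.Set.nodup_update _ _ hnd
    obtain ⟨hnd2, hmem2⟩ := ih _ hnd1
    refine ⟨hnd2, fun x => ?_⟩
    simp only [List.foldl_cons]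
    rw [hmem2 x, pvA_inner seq k d, PySem.Set.mem_update]
    simp only [List.mem_map, List.mem_filter, List.mem_cons]
    constructor
    · rintro ((h | ⟨i, ⟨hi, hc⟩, hx⟩) | ⟨s, hs, i, hi, hc, hx⟩)
      · exact Or.inl h
      · exact Or.inr ⟨seq, Or.inl rfl, i, hi, by simpa using hc, hx.symm⟩
      · exact Or.inr ⟨s, Or.inr hs, i, hi, hc, hx⟩
    · rintro (h | ⟨s, (rfl | hs), i, hi, hc, hx⟩)
      · exact Or.inl (Or.inl h)
      · exact Or.inl (Or.inr ⟨i, ⟨hi, by simpa using hc⟩, hx.symm⟩)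
      · exact Or.inr ⟨s, hs, i, hi, hc, hx⟩

lemma pvCond_iff (w : List Char) :
    PySem.Set.issubset (PySem.Set.ofList (String.ofList w).toList) pvValidSet = true ↔
      w.all pvIsValid := by
  simp only [String.toList_ofList, PySem.Set.issubset_iff, PySem.Set.mem_ofList,
    List.all_eq_true, pvIsValid, decide_eq_true_eq]

lemma pvSlice_eq_win (cs : List Char) (k : Int) (hk : 1 ≤ k) (i : Int) (hi : 0 ≤ i) :
    PySem.List.slice cs (some i) (some (i + k)) = pvWin cs k.toNat i.toNat := by
  rw [PySem.List.slice_toNat cs hi (by omega)]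
  rw [pvWin]
  congr 1
  omega

lemma pvA_canon (seqs : List String) (k : Int) (hk : 1 ≤ k) (x : String) :
    (∃ seq ∈ seqs, ∃ i ∈ PySem.List.pyRange 0 (PySem.Str.len seq - k + 1) 1,
        (PySem.Set.issubset (PySem.Set.ofList
            (String.ofList (PySem.List.slice seq.toList (some i) (some (i + k)))).toList) pvValidSet)
          ∧ x = String.ofList (PySem.List.slice seq.toList (some i) (some (i + k)))) ↔
      pvKmerOf seqs k.toNat x := by
  unfold pvKmerOf
  constructor
  · rintro ⟨seq, hs, i, hi, hc, hx⟩
    rw [PySem.List.mem_pyRange_one] at hi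
    obtain ⟨hi0, hilt⟩ := hi
    rw [PySem.Str.len_eq] at hilt
    rw [pvSlice_eq_win seq.toList k hk i hi0] at hc hx
    exact ⟨seq, hs, i.toNat, by omega, (pvCond_iff _).mp hc, hx⟩
  · rintro ⟨seq, hs, j, hj, hv, hx⟩
    refine ⟨seq, hs, (j : Int), ?_, ?_, ?_⟩
    · rw [PySem.List.mem_pyRange_one, PySem.Str.len_eq]
      omega
    · rw [pvSlice_eq_win seq.toList k hk (j : Int) (by omega)]
      rw [Int.toNat_natCast]
      exact (pvCond_iff _).mpr hv
    · rw [pvSlice_eq_win seq.toList k hk (j : Int) (by omega), Int.toNat_natCast]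
      exact hx

lemma pvMainEq (transcripts reads : List String) (k : Int)
    (h : ¬ (k ≤ 0 ∧ transcripts ++ reads ≠ [])) :
    extract_all_kmers transcripts reads k = extract_all_kmers_alt transcripts reads k := by
  by_cases hnil : transcripts ++ reads = []
  · unfold extract_all_kmers extract_all_kmers_alt
    rw [hnil]
    simp only [List.foldl_nil]
    have hkeys : (PySem.Dict.empty : PySem.Dict String Int).keys = [] := rfl
    rw [hkeys]
    split <;> rfl
  · have hk : 1 ≤ k := by
      rcases not_and_or.mp h with h1 | h2
      · omega
      · exact absurd (not_not.mp h2) hnil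
    unfold extract_all_kmers extract_all_kmers_alt
    rw [if_neg (by omega)]
    have hndE : ((PySem.Dict.empty : PySem.Dict String Int)).keys.Nodup := by
      simp [PySem.Dict.keys_empty]
    obtain ⟨hndA, hmemA⟩ := pvA_keys (transcripts ++ reads) k PySem.Dict.empty hndE
    obtain ⟨hndB, hmemB⟩ := pvB_outer (transcripts ++ reads) k hk PySem.Set.empty (by simp [PySem.Set.empty])
    apply PySem.List.sorted_eq_sorted_of_perm _ _ _ (fun a b hab => hab)
    rw [List.perm_ext_iff_of_nodup hndA hndB]
    intro x
    rw [hmemA x, hmemB x]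
    rw [pvA_canon (transcripts ++ reads) k hk x]
    have hE : x ∈ (PySem.Dict.empty : PySem.Dict String Int).keys ↔ False := by
      simp [PySem.Dict.keys_empty]
    have hE2 : x ∈ (PySem.Set.empty : PySem.Set String) ↔ False := by
      simp [PySem.Set.empty]
    rw [hE, hE2]

lemma pvTight (transcripts reads : List String) (k : Int)
    (hD : k ≤ 0 ∧ transcripts ++ reads ≠ []) :
    extract_all_kmers transcripts reads k ≠ extract_all_kmers_alt transcripts reads k := by
  obtain ⟨hk, hne⟩ := hD
  have hBnil : extract_all_kmers_alt transcripts reads k = [] := by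
    unfold extract_all_kmers_alt; rw [if_pos hk]
  rw [hBnil]
  obtain ⟨s, rest, hcons⟩ := List.exists_cons_of_ne_nil hne
  have hndE : ((PySem.Dict.empty : PySem.Dict String Int)).keys.Nodup := by
    simp [PySem.Dict.keys_empty]
  obtain ⟨-, hmemA⟩ := pvA_keys (transcripts ++ reads) k PySem.Dict.empty hndE
  have hL0 : (0 : Int) ≤ PySem.Str.len s := by rw [PySem.Str.len_eq]; positivity
  have hkm : String.ofList (PySem.List.slice s.toList (some (PySem.Str.len s - k))
      (some (PySem.Str.len s - k + k))) = "" := by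
    rw [PySem.List.slice_toNat s.toList (by omega) (by omega)]
    have h0 : (PySem.Str.len s - k + k).toNat - (PySem.Str.len s - k).toNat = 0 := by
      rw [PySem.Str.len_eq]; omega
    rw [h0, List.take_zero]
  have hmem : "" ∈ (extract_all_kmers transcripts reads k) := by
    unfold extract_all_kmers
    rw [PySem.List.mem_sorted]
    rw [hmemA ""]
    refine Or.inr ⟨s, by rw [hcons]; exact List.mem_cons_self, PySem.Str.len s - k, ?_, ?_, ?_⟩
    · rw [PySem.List.mem_pyRange_one]; omega
    · rw [hkm]
      decide
    · rw [hkm]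
  exact fun h => by rw [h] at hmem; exact (List.not_mem_nil) hmem

-- ===== VERDICT (by name: the statement is the Claim_ definition above) =====
theorem extract_all_kmers_spec : Claim_unchanged_extract_all_kmers := by
  intro transcripts reads k _ hD
  exact pvMainEq transcripts reads k hD

theorem extract_all_kmers_changed : Claim_changed_extract_all_kmers := by
  unfold Claim_changed_extract_all_kmers; decide

theorem extract_all_kmers_tight : Claim_exact_extract_all_kmers := by
  intro transcripts reads k _ hD
  exact pvTight transcripts reads k hD
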